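-- pv_equiv track=rewrite | github.com/bhuvi2018/Infytq | PF/Problem 41-46.py | doublePreceding
-- ===== SOURCE A (Python) =====
-- def doublePreceding (values):
--     if len(values) > 0:
--         previous = values[0]
--         values[0] = 0
--         for idx in range(1, len(values)):
--             previous1 = values[idx]
--             values[idx] = 2 * previous
--             previous=previous1
--     return values
-- ===== SOURCE B (Python) =====
-- def doublePreceding(values):
--     if values:
--         values[:] = [0] + [2 * v for v in values[:-1]]
--     return values
-- ===== Notes on version B (the rewrite author's own statement) =====
-- stated objective: simpler
-- what changed: Replaces the running-previous temporary and interleaved in-place overwrite with a build-then-assign decomposition: construct a fresh list of a leading zero followed by doubled predecessors from the untouched originals, then slice-assign it back.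
import Mathlib
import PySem

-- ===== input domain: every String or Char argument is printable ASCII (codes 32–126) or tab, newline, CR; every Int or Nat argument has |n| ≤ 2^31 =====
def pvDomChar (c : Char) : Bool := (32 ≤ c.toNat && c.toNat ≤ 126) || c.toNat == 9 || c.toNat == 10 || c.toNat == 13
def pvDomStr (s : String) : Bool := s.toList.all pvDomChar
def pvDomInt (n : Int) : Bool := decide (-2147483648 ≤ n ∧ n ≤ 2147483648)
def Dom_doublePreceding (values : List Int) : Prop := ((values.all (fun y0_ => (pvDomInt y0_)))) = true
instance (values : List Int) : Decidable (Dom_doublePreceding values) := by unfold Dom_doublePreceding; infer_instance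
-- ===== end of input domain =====

-- ===== PORT A =====
-- B rebuilds the list instead of mutating with a running temp; objective: simpler. Both
-- Pythons mutate `values` in place; the equivalence proved here is about the return value.
def pvStepA (st : List Int × Int) (idx : Int) : List Int × Int :=
  let previous1 := PySem.List.pyGetD st.1 idx 0
  (st.1.set idx.toNat (2 * st.2), previous1)

def doublePreceding (values : List Int) : List Int :=
  if values.length > 0 then
    let previous := PySem.List.pyGetD values 0 0
    let vs := values.set 0 0
    ((PySem.List.pyRange 1 (values.length : Int) 1).foldl pvStepA (vs, previous)).1
  else values

-- ===== PORT B =====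
def doublePreceding_alt (values : List Int) : List Int :=
  if values = [] then values
  else 0 :: (PySem.List.slice values none (some (-1))).map (fun v => 2 * v)

-- ===== PRECONDITION & SPEC =====
def Spec_doublePreceding (values : List Int) (out : List Int) : Prop := out = doublePreceding_alt values
instance (values : List Int) (out : List Int) : Decidable (Spec_doublePreceding values out) := by unfold Spec_doublePreceding; infer_instance

-- ===== CLAIM (what is proved, stated in full; the proofs are below) =====
def Claim_equal_doublePreceding : Prop := ∀ (values : List Int), Dom_doublePreceding values → Spec_doublePreceding values (doublePreceding values)

-- ===== LEMMAS AND PROOFS =====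

lemma pvLoop (rest : List Int) : ∀ (done : List Int) (prev : Int),
    (PySem.List.pyRange (done.length : Int) ((done.length : Int) + (rest.length : Int)) 1).foldl
        pvStepA (done ++ rest, prev)
      = (done ++ ((prev :: rest).dropLast).map (fun v => 2 * v),
         (prev :: rest).getLast (by simp)) := by
  induction rest with
  | nil =>
    intro done prev
    simp [PySem.List.pyRange_one_eq_nil]
  | cons r rs ih =>
    intro done prev
    rw [PySem.List.pyRange_one_cons (by push_cast [List.length_cons]; omega)]
    simp only [List.foldl_cons]
    have hstep : pvStepA (done ++ r :: rs, prev) (done.length : Int)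
        = ((done ++ [2 * prev]) ++ rs, r) := by
      simp [pvStepA, PySem.List.pyGetD_natCast]
    rw [hstep]
    have harith : ((done.length : Int) + 1) = (((done ++ [2 * prev]).length : Int)) := by
      simp
    have harith2 : ((done.length : Int) + ((r :: rs).length : Int))
        = (((done ++ [2 * prev]).length : Int) + (rs.length : Int)) := by
      simp; omega
    rw [harith, harith2, ih (done ++ [2 * prev]) r]
    simp

theorem doublePreceding_spec : Claim_equal_doublePreceding := by
  intro values _
  unfold Spec_doublePreceding doublePreceding doublePreceding_alt
  cases values with
  | nil => simp
  | cons v t =>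
    have hv : PySem.List.pyGetD (v :: t) 0 0 = v := by
      simp [PySem.List.pyGetD, PySem.List.pyGet?, PySem.List.pyIdx?]
    have h0 : (v :: t).set 0 0 = [0] ++ t := by simp
    have hb : PySem.List.pyRange 1 ((t.length + 1 : Nat) : Int) 1
        = PySem.List.pyRange (([0] : List Int).length : Int)
            ((([0] : List Int).length : Int) + (t.length : Int)) 1 := by
      congr 1
      simp
      omega
    simp only [List.length_cons, gt_iff_lt]
    rw [if_pos (by omega), hv, h0, hb, pvLoop t [0] v]
    simp only [PySem.List.slice_to_neg_one, List.map_dropLast, List.map_cons]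
    simp
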